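/- GENERATED by tools/from_farm_form.py from prooffarm-gif/accepted/prog_main.1/Proof.lean (a worked proof of the farm's unit `prog_main.1`,
   accepted by the verdict) — do not edit. -/
import Gif.Spec.Units.prog_main_1
import Gif.Spec.AllSegs
import Gif.Spec.Proved.prog_main_1_Lemmas

open X86 X86.User Asan ProgX.Base ProgX.Base.Spec Gif.Spec

/-!
  `prog_main.1` (0x105042 … 0x105082, 17 instructions; gif_driver.c:250-258): THE BODY OF THE DRIVER'S TOP FUNCTION, a body segment
  of a protected function at HEAP LEVEL (no forest, no reader: the assertions carry `HeapInv` only) with TWO contract calls: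
  `gif_decode(in, len, &report)` with the report an object of the OWN frame, then `memcpy(out, &report, 64)` under the heap `H'`
  that gif_decode left. The return address of gif_decode, 0x105057 (`ret1`), is not a cut of the design: the unit makes it one of
  its own (`pm1_AtRet1` = `Core` + `rbp = out`, `r12 = cap`, the heap `H'` with its invariant) and walks in two lemmas (Lemmas.lean):

      pm1_seg_call     0x105042 … `call gif_decode` … 0x105057 (ret1); or `len < 0`: 0x10507d … 0x105082 (`Done`)
      pm1_seg_tail     0x105057 … 0x105082: `cap < 64`: `Done`; otherwise `call memcpy`, 0x105076 (ret2), `eax = 64`, `Done`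
-/

/-- Segment 1 of `prog_main` takes `Body` at 0x105042 to `Done` at 0x105082. -/
theorem Gif.Spec.Proved.prog_main_1_ok : Gif.Spec.prog_main_1.Statement := by
  intro Lay hLay μ hμ u₀ hcode h_gif_decode h_memcpy H rest frames e ret v hat
  -- gif_decode's contract for the entry's heap and the frame list of the body (the own frame in front)
  have hgd := h_gif_decode H rest (prog_main.framesIn frames e)
  -- 0x105042 … the call … 0x105057, or the `len < 0` arm to 0x105082
  refine (Gif.Spec.prog_main_1.pm1_seg_call Lay hLay μ hμ u₀ hcode H rest frames e ret hgd v hat).trans ?_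
  intro v1 hv1
  rcases hv1 with hret1 | hdone
  · -- 0x105057 … 0x105082 (memcpy's contract is instantiated inside: its heap is the one gif_decode returned)
    exact Gif.Spec.prog_main_1.pm1_seg_tail Lay hLay μ hμ u₀ hcode H rest frames e ret h_memcpy v1 hret1
  · -- already at the epilogue's cut
    exact ReachVia.done hdone
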